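-- pv_equiv track=rewrite | github.com/dawidpawliczek4/UWr | wstep-do-python/lista10/zad5.py | relacja_rown
-- ===== SOURCE A (Python) =====
-- def relacja_rown(elem):
--     if not elem:
--         return [[]]
--     rez = []
--     first = elem[0]
--     for smaller in relacja_rown(elem[1:]):
--         for n, subset in enumerate(smaller):
--             rez.append(smaller[:n] + [[first] + subset] + smaller[n+1:])
--         rez.append([[first]] + smaller)
--     return rez
-- ===== SOURCE B (Python) =====
-- def relacja_rown(elem):
--     # Iterative bottom-up build instead of recursion: fold elements in reverse.
--     partitions = [[]]
--     for first in reversed(elem):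
--         fresh = []
--         for smaller in partitions:
--             for n, subset in enumerate(smaller):
--                 fresh.append(smaller[:n] + [[first] + subset] + smaller[n+1:])
--             fresh.append([[first]] + smaller)
--         partitions = fresh
--     return partitions
-- ===== Notes on version B (the rewrite author's own statement) =====
-- stated objective: alternative
-- what changed: Replaces A's recursion on the tail by an iterative bottom-up fold: start from the single empty partition and, for each element of the input in reverse order, rebuild the partition list in one pass.
import Mathlib
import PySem

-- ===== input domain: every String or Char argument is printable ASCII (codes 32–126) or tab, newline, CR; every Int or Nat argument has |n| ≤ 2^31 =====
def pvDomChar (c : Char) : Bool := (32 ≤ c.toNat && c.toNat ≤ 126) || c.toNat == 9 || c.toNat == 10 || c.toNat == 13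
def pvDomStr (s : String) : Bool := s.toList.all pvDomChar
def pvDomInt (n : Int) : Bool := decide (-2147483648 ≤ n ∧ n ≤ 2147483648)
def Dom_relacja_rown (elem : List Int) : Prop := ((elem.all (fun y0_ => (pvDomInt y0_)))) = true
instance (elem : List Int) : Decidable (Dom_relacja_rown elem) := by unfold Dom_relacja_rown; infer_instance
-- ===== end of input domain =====

-- B rebuilds the partitions iteratively (fold over the reversed input) instead of A's recursion; objective: alternative decomposition, same output order.


-- ===== PORT A =====
-- Literal port of A's recursion: rez accumulated by the two nested append loops.
def relacja_rown (elem : List Int) : List (List (List Int)) :=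
  match elem with
  | [] => [[]]
  | first :: rest =>
      (relacja_rown rest).foldl (fun rez smaller =>
        ((PySem.List.enumerate smaller 0).foldl (fun rez p =>
            rez ++ [smaller.take p.1.toNat ++ [first :: p.2] ++ smaller.drop (p.1.toNat + 1)]) rez)
        ++ [[first] :: smaller]) []

-- ===== PORT B =====
-- One pass over `partitions` producing `fresh` for one element `first` (B's inner two loops).
def pvStepB (parts : List (List (List Int))) (first : Int) : List (List (List Int)) :=
  parts.foldl (fun fresh smaller =>
    ((PySem.List.enumerate smaller 0).foldl (fun fresh p =>
        fresh ++ [smaller.take p.1.toNat ++ [first :: p.2] ++ smaller.drop (p.1.toNat + 1)]) fresh)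
    ++ [[first] :: smaller]) []

-- B: fold the reversed input, starting from the single empty partition.
def relacja_rown_alt (elem : List Int) : List (List (List Int)) :=
  elem.reverse.foldl pvStepB [[]]

-- ===== PRECONDITION & SPEC =====
def Spec_relacja_rown (elem : List Int) (out : List (List (List Int))) : Prop := out = relacja_rown_alt elem
instance (elem : List Int) (out : List (List (List Int))) : Decidable (Spec_relacja_rown elem out) := by unfold Spec_relacja_rown; infer_instance

-- ===== CLAIM (what is proved, stated in full; the proofs are below) =====
def Claim_equal_relacja_rown : Prop := ∀ (elem : List Int), Dom_relacja_rown elem → Spec_relacja_rown elem (relacja_rown elem)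

-- ===== LEMMAS AND PROOFS =====
theorem relacja_rown_cons (first : Int) (rest : List Int) :
    relacja_rown (first :: rest) = pvStepB (relacja_rown rest) first := rfl

theorem relacja_rown_eq_foldr (elem : List Int) :
    relacja_rown elem = elem.foldr (fun x acc => pvStepB acc x) [[]] := by
  induction elem with
  | nil => rfl
  | cons x xs ih => rw [relacja_rown_cons, ih]; rfl

-- ===== VERDICT (by name: the statement is the Claim_ definition above) =====
theorem relacja_rown_spec : Claim_equal_relacja_rown := by
  intro elem _
  show relacja_rown elem = relacja_rown_alt elem
  rw [relacja_rown_eq_foldr, relacja_rown_alt, List.foldl_reverse]
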